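-- pv_equiv track=rewrite | github.com/thealper2/codewars-solutions | 7-kyu/fix_my_circles.py | circle_mender
-- ===== SOURCE A (Python) =====
-- def circle_mender(content: str) -> str:
--     result = []
--     for line in content.split('\n'):
--         l = line.find('#')
--         r = line.rfind('#')
--         if l != -1 and r != -1:
--             line = line[:l] + '#' * (r - l + 1) + line[r+1:]
--
--         result.append(line)
--
--     return '\n'.join(result)
-- ===== SOURCE B (Python) =====
-- def circle_mender(content: str) -> str:
--     out = []
--     i = 0
--     n = len(content)
--     while i < n:
--         c = content[i]
--         if c == '#':
--             # scan ahead for the last '#' before the next newline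
--             j = -1
--             k = i + 1
--             while k < n and content[k] != '\n':
--                 if content[k] == '#':
--                     j = k
--                 k += 1
--             if j == -1:
--                 out.append('#')
--                 i += 1
--             else:
--                 out.append('#' * (j - i + 1))
--                 i = j + 1
--         else:
--             out.append(c)
--             i += 1
--     return ''.join(out)
-- ===== Notes on version B (the rewrite author's own statement) =====
-- stated objective: alternative
-- what changed: Replaces A's split(' ') / find / rfind / slice-and-concatenate per-line pipeline with a single forward scan over the whole string: at each '#' a lookahead finds the last '#' before the next newline and that whole span is emitted as a run of '#'.
import Mathlib
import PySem

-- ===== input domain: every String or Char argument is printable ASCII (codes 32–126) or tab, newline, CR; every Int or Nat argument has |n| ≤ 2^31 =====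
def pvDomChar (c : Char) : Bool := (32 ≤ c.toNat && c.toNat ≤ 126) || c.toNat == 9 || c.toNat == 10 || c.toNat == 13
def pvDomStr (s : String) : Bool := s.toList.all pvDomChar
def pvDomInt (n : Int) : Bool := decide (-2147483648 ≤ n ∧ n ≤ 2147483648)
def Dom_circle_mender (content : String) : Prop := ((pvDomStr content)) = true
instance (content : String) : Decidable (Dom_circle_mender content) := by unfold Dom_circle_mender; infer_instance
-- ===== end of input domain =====

-- B replaces A's split/find/rfind/slice-and-splice pipeline by one forward scan over the
-- character stream (on a '#', a lookahead to the last '#' before the next newline);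
-- objective: alternative algorithm of similar cost.

-- ===== PORT A =====
-- body of A's for-loop: l = line.find('#'), r = line.rfind('#'), splice a '#'-run between them
def pvFixLineA (line : List Char) : List Char :=
  let l := PySem.Chars.find line ['#']
  let r := PySem.Chars.rfind line ['#']
  if l ≠ -1 ∧ r ≠ -1 then
    PySem.List.slice line none (some l) ++ List.replicate (r - l + 1).toNat '#'
      ++ PySem.List.slice line (some (r + 1)) none
  else line

-- content.split('\n'), each line transformed, '\n'.join(result)
def circle_mender (content : String) : String :=
  String.ofList (PySem.Chars.join ['\n'] ((PySem.Chars.splitOn content.toList ['\n']).map pvFixLineA))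

-- ===== PORT B =====
-- inner while loop of B: walk to the next newline, remembering the last '#' seen (k = current offset)
def pvScanLast (cs : List Char) (k : Nat) (j : Option Nat) : Option Nat :=
  match cs with
  | [] => j
  | c :: rest =>
    if c = '\n' then j
    else pvScanLast rest (k + 1) (if c = '#' then some k else j)

-- outer while loop of B over the character stream
def pvBGo (cs : List Char) : List Char :=
  match cs with
  | [] => []
  | c :: rest =>
    if c = '#' then
      match pvScanLast rest 0 none with
      | none => '#' :: pvBGo rest
      | some j => List.replicate (j + 2) '#' ++ pvBGo (rest.drop (j + 1))
    else c :: pvBGo rest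
termination_by cs.length
decreasing_by
  · simp
  · simp only [List.length_cons]
    have : (rest.drop (j+1)).length ≤ rest.length := by simp
    omega
  · simp

def circle_mender_alt (content : String) : String := String.ofList (pvBGo content.toList)

-- ===== PRECONDITION & SPEC =====
def Spec_circle_mender (content : String) (out : String) : Prop := out = circle_mender_alt content
instance (content : String) (out : String) : Decidable (Spec_circle_mender content out) := by unfold Spec_circle_mender; infer_instance

-- ===== CLAIM (what is proved, stated in full; the proofs are below) =====
def Claim_equal_circle_mender : Prop := ∀ (content : String), Dom_circle_mender content → Spec_circle_mender content (circle_mender content)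

-- ===== LEMMAS AND PROOFS =====

-- ============ lines ============
def pvLines : List Char → List (List Char)
  | [] => [[]]
  | c :: cs =>
    match pvLines cs with
    | [] => [[c]]
    | h :: t => if c = '\n' then [] :: h :: t else (c :: h) :: t

theorem pvLines_ne_nil (cs : List Char) : pvLines cs ≠ [] := by
  cases cs with
  | nil => simp [pvLines]
  | cons c rest =>
    simp only [pvLines]
    rcases h : pvLines rest with _ | ⟨a, b⟩ <;> simp
    split <;> simp

def pvPre (p : List Char) : List (List Char) → List (List Char)
  | [] => []
  | h :: t => (p ++ h) :: t

theorem pv_splitOn_go (fuel : Nat) : ∀ (l cur : List Char) (acc : List (List Char)),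
    l.length < fuel →
    PySem.Chars.splitOn.go ['\n'] fuel l cur acc = acc.reverse ++ pvPre cur.reverse (pvLines l) := by
  induction fuel with
  | zero => intro l cur acc h; omega
  | succ fuel ih =>
    intro l cur acc h
    cases l with
    | nil => simp [PySem.Chars.splitOn.go, pvLines, pvPre]
    | cons c rest =>
      have hlen : rest.length < fuel := by simpa using h
      by_cases hc : c = '\n'
      · have hstep : PySem.Chars.splitOn.go ['\n'] (fuel+1) (c :: rest) cur acc =
            PySem.Chars.splitOn.go ['\n'] fuel rest [] (cur.reverse :: acc) := by
          subst hc
          simp [PySem.Chars.splitOn.go, List.isPrefixOf]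
        rw [hstep, ih rest [] (cur.reverse :: acc) hlen]
        subst hc
        simp only [pvLines]
        rcases hr : pvLines rest with _ | ⟨a, b⟩
        · exact absurd hr (pvLines_ne_nil rest)
        · simp [pvPre]
      · have hstep : PySem.Chars.splitOn.go ['\n'] (fuel+1) (c :: rest) cur acc =
            PySem.Chars.splitOn.go ['\n'] fuel rest (c :: cur) acc := by
          have hpf : (['\n'].isPrefixOf (c :: rest)) = false := by
            simp [List.isPrefixOf]
            exact fun hh => absurd hh.symm hc
          simp [PySem.Chars.splitOn.go, hpf]
        rw [hstep, ih rest (c :: cur) acc hlen]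
        simp only [pvLines]
        rcases hr : pvLines rest with _ | ⟨a, b⟩
        · exact absurd hr (pvLines_ne_nil rest)
        · simp [pvPre, hc]

theorem pv_splitOn (cs : List Char) : PySem.Chars.splitOn cs ['\n'] = pvLines cs := by
  show PySem.Chars.splitOn.go ['\n'] (cs.length + 1) cs [] [] = _
  rw [pv_splitOn_go (cs.length + 1) cs [] [] (by omega)]
  rcases h : pvLines cs with _ | ⟨a, b⟩
  · exact absurd h (pvLines_ne_nil cs)
  · simp [pvPre]

theorem pvLines_no_nl (cs : List Char) (h : '\n' ∉ cs) : pvLines cs = [cs] := by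
  induction cs with
  | nil => simp [pvLines]
  | cons c rest ih =>
    simp only [List.mem_cons, not_or] at h
    simp [pvLines, ih h.2, Ne.symm h.1]

theorem pvLines_append (line rest : List Char) (h : '\n' ∉ line) :
    pvLines (line ++ '\n' :: rest) = line :: pvLines rest := by
  induction line with
  | nil =>
    simp only [List.nil_append, pvLines]
    rcases hr : pvLines rest with _ | ⟨a, b⟩
    · exact absurd hr (pvLines_ne_nil rest)
    · simp
  | cons c l ih =>
    simp only [List.mem_cons, not_or] at h
    simp [pvLines, ih h.2, Ne.symm h.1]

-- ============ find ============
def pvF : List Char → Int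
  | [] => -1
  | c :: t => if c = '#' then 0 else if pvF t = -1 then -1 else pvF t + 1

theorem pvF_nonneg_or (l : List Char) : 0 ≤ pvF l ∨ pvF l = -1 := by
  induction l with
  | nil => simp [pvF]
  | cons a b ih =>
    simp only [pvF]
    split
    · left; norm_num
    · split
      · right; rfl
      · rcases ih with h | h
        · left; omega
        · simp [h] at *

theorem pv_find_go (l : List Char) : ∀ (k : Nat),
    PySem.Chars.find.go ['#'] l k = if pvF l = -1 then -1 else k + pvF l := by
  induction l with
  | nil => intro k; simp [PySem.Chars.find.go, pvF]
  | cons c t ih =>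
    intro k
    by_cases hc : c = '#'
    · have hstep : PySem.Chars.find.go ['#'] (c :: t) k = (k : Int) := by
        subst hc
        simp [PySem.Chars.find.go, List.isPrefixOf]
      rw [hstep]
      simp [pvF, hc]
    · have hstep : PySem.Chars.find.go ['#'] (c :: t) k =
          PySem.Chars.find.go ['#'] t (k + 1) := by
        have hpf : (['#'].isPrefixOf (c :: t)) = false := by
          simp [List.isPrefixOf]
          exact fun hh => absurd hh.symm hc
        simp [PySem.Chars.find.go, hpf]
      rw [hstep, ih (k+1)]
      simp only [pvF, hc, if_false]
      push_cast
      rcases pvF_nonneg_or t with h0 | h0 <;> split_ifs <;> omega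

theorem pv_find (l : List Char) : PySem.Chars.find l ['#'] = pvF l := by
  show PySem.Chars.find.go ['#'] l 0 = _
  rw [pv_find_go]
  split <;> simp_all

theorem pvF_neg_iff (l : List Char) : pvF l = -1 ↔ '#' ∉ l := by
  induction l with
  | nil => simp [pvF]
  | cons c t ih =>
    simp only [pvF, List.mem_cons, not_or]
    constructor
    · intro h
      by_cases hc : c = '#'
      · simp [hc] at h
      · simp only [hc, if_false] at h
        refine ⟨fun hh => absurd hh.symm hc, ?_⟩
        by_cases ht : pvF t = -1
        · exact ih.mp ht
        · rw [if_neg ht] at h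
          rcases pvF_nonneg_or t with h0 | h0
          · omega
          · exact absurd h0 ht
    · rintro ⟨h1, h2⟩
      simp [Ne.symm h1, ih.mpr h2]

theorem pvF_append (p q : List Char) (h : '#' ∉ p) : pvF (p ++ '#' :: q) = p.length := by
  induction p with
  | nil => simp [pvF]
  | cons c t ih =>
    simp only [List.mem_cons, not_or] at h
    have hne : pvF (t ++ '#' :: q) ≠ -1 := by
      rw [ne_eq, pvF_neg_iff]
      simp
    simp only [List.cons_append, pvF, Ne.symm h.1, if_false, ih h.2, List.length_cons]
    have hne2 : ((t.length : Int)) ≠ -1 := by omega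
    rw [if_neg hne2]
    push_cast
    ring

-- ============ rfind ============
theorem pv_pref_drop (s : List Char) (k : Nat) :
    (['#'].isPrefixOf (s.drop k)) = (s[k]? == some '#') := by
  rcases h : s.drop k with _ | ⟨c, t⟩
  · have hnone : s[k]? = none := by
      rw [List.getElem?_eq_none_iff]
      have := congrArg List.length h
      simp at this
      omega
    simp [hnone, List.isPrefixOf]
  · have hc : s[k]? = some c := by
      have := @List.getElem?_drop _ s k 0
      rw [h] at this
      simpa using this.symm
    rw [hc]
    simp [List.isPrefixOf]
    by_cases he : c = '#' <;> simp [he, eq_comm]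

def pvLH (s : List Char) : Nat → Int
  | 0 => if s[0]? = some '#' then 0 else -1
  | j + 1 => if s[j+1]? = some '#' then ((j : Int) + 1) else pvLH s j

theorem pv_rfind_go (s : List Char) : ∀ (j : Nat), PySem.Chars.rfind.go s ['#'] j = pvLH s j := by
  intro j
  induction j with
  | zero =>
    have hstep : PySem.Chars.rfind.go s ['#'] 0 = if ['#'].isPrefixOf s then 0 else -1 := by
      simp [PySem.Chars.rfind.go]
    rw [hstep, pvLH]
    have hp := pv_pref_drop s 0
    simp only [List.drop_zero] at hp
    rw [hp]
    by_cases h : s[0]? = some '#' <;> simp [h]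
  | succ j ih =>
    have hstep : PySem.Chars.rfind.go s ['#'] (j+1) =
        if ['#'].isPrefixOf (s.drop (j+1)) then ((j:Int)+1) else PySem.Chars.rfind.go s ['#'] j := by
      simp [PySem.Chars.rfind.go]
    rw [hstep, pv_pref_drop, ih]
    show _ = pvLH s (j+1)
    rw [pvLH]
    by_cases h : s[j+1]? = some '#' <;> simp [h]

theorem pvLH_spec (s : List Char) (j : Nat) :
    (pvLH s j = -1 ∧ ∀ i ≤ j, s[i]? ≠ some '#') ∨
    (∃ n : Nat, n ≤ j ∧ pvLH s j = n ∧ s[n]? = some '#' ∧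
      ∀ i, n < i → i ≤ j → s[i]? ≠ some '#') := by
  induction j with
  | zero =>
    by_cases h : s[0]? = some '#'
    · right; exact ⟨0, le_refl _, by simp [pvLH, h], h, by omega⟩
    · left
      refine ⟨by simp [pvLH, h], ?_⟩
      intro i hi
      interval_cases i
      exact h
  | succ j ih =>
    by_cases h : s[j+1]? = some '#'
    · right
      refine ⟨j+1, le_refl _, by simp [pvLH, h], h, by omega⟩
    · rcases ih with ⟨h1, h2⟩ | ⟨n, hn, h1, h2, h3⟩
      · left
        refine ⟨by simp [pvLH, h, h1], ?_⟩
        intro i hi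
        rcases Nat.lt_or_ge i (j+1) with hlt | hge
        · exact h2 i (by omega)
        · have hi' : i = j + 1 := by omega
          rw [hi']
          exact h
      · right
        refine ⟨n, by omega, by simp [pvLH, h, h1], h2, ?_⟩
        intro i hni hij
        rcases Nat.lt_or_ge i (j+1) with hlt | hge
        · exact h3 i hni (by omega)
        · have hi' : i = j + 1 := by omega
          rw [hi']
          exact h

theorem pv_rfind_val (s : List Char) (n : Nat) (hn : s[n]? = some '#')
    (hmax : ∀ i, n < i → s[i]? ≠ some '#') :
    PySem.Chars.rfind s ['#'] = n := by
  have hlen : n < s.length := by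
    by_contra hc
    push Not at hc
    rw [List.getElem?_eq_none_iff.mpr hc] at hn
    exact absurd hn (by simp)
  show PySem.Chars.rfind.go s ['#'] s.length = n
  rw [pv_rfind_go]
  rcases pvLH_spec s s.length with ⟨h1, h2⟩ | ⟨m, hm, h1, h2, h3⟩
  · exact absurd hn (h2 n (by omega))
  · rcases Nat.lt_trichotomy m n with hlt | heq | hgt
    · exact absurd hn (h3 n hlt (by omega))
    · rw [h1, heq]
    · exact absurd h2 (hmax m hgt)

-- ============ pvLast ============
def pvLast : List Char → Option Nat
  | [] => none
  | c :: t =>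
    match pvLast t with
    | some k => some (k + 1)
    | none => if c = '#' then some 0 else none

theorem pvLast_none_iff (q : List Char) : pvLast q = none ↔ '#' ∉ q := by
  induction q with
  | nil => simp [pvLast]
  | cons c t ih =>
    rcases h : pvLast t with _ | k
    · rw [h] at ih
      by_cases hc : c = '#'
      · simp [pvLast, h, hc]
      · simp [pvLast, h, hc, Ne.symm hc, ih.mp rfl]
    · have hmt : '#' ∈ t := by
        by_contra hh
        rw [ih.mpr hh] at h
        cases h
      simp [pvLast, h, hmt]

theorem pvLast_some_spec (q : List Char) (m : Nat) (h : pvLast q = some m) :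
    m < q.length ∧ q[m]? = some '#' ∧ ∀ i, m < i → q[i]? ≠ some '#' := by
  induction q generalizing m with
  | nil => simp [pvLast] at h
  | cons c t ih =>
    simp only [pvLast] at h
    rcases ht : pvLast t with _ | k
    · rw [ht] at h
      by_cases hc : c = '#'
      · simp [hc] at h
        subst h
        refine ⟨by simp, by simp [hc], ?_⟩
        intro i hi
        rcases i with _ | i'
        · omega
        · have hnot := (pvLast_none_iff t).mp ht
          simp only [List.getElem?_cons_succ]
          intro hmem
          exact hnot (List.mem_of_getElem? hmem)
      · simp [hc] at h
    · rw [ht] at h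
      simp only [Option.some.injEq] at h
      subst h
      obtain ⟨hk1, hk2, hk3⟩ := ih k ht
      refine ⟨by simpa using hk1, by simpa using hk2, ?_⟩
      intro i hi
      rcases i with _ | i'
      · omega
      · simpa using hk3 i' (by omega)

-- ============ scan ============
def pvStop (t : List Char) : Prop := t = [] ∨ ∃ r, t = '\n' :: r

theorem pv_scan (q : List Char) (hq : '\n' ∉ q) (t : List Char) (ht : pvStop t) :
    ∀ (k : Nat) (j : Option Nat),
    pvScanLast (q ++ t) k j = match pvLast q with | some m => some (k + m) | none => j := by
  induction q with
  | nil =>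
    intro k j
    rcases ht with h | ⟨r, h⟩ <;> simp [h, pvScanLast, pvLast]
  | cons c q' ih =>
    intro k j
    simp only [List.mem_cons, not_or] at hq
    have hcnl : ¬ c = '\n' := Ne.symm hq.1
    simp only [List.cons_append, pvScanLast, hcnl, if_false]
    rw [ih hq.2]
    simp only [pvLast]
    rcases h : pvLast q' with _ | m
    · by_cases hc : c = '#' <;> simp [hc]
    · simp only []
      congr 1
      omega

-- ============ bGo lemmas ============
theorem pvBGo_nil : pvBGo [] = [] := by simp [pvBGo]

theorem pvBGo_cons_ne (c : Char) (rest : List Char) (h : c ≠ '#') :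
    pvBGo (c :: rest) = c :: pvBGo rest := by
  rw [pvBGo]
  simp [h]

theorem pvBGo_cons_hash (rest : List Char) :
    pvBGo ('#' :: rest) =
      (match pvScanLast rest 0 none with
       | none => '#' :: pvBGo rest
       | some j => List.replicate (j + 2) '#' ++ pvBGo (rest.drop (j + 1))) := by
  rw [pvBGo]
  simp

theorem pvBGo_hash_none (rest : List Char) (h : pvScanLast rest 0 none = none) :
    pvBGo ('#' :: rest) = '#' :: pvBGo rest := by
  rw [pvBGo_cons_hash, h]

theorem pvBGo_hash_some (rest : List Char) (j : Nat) (h : pvScanLast rest 0 none = some j) :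
    pvBGo ('#' :: rest) = List.replicate (j + 2) '#' ++ pvBGo (rest.drop (j + 1)) := by
  rw [pvBGo_cons_hash, h]

theorem pvBGo_app (line : List Char) (h1 : '#' ∉ line) (h2 : '\n' ∉ line) (t : List Char) :
    pvBGo (line ++ t) = line ++ pvBGo t := by
  induction line with
  | nil => simp
  | cons c l ih =>
    simp only [List.mem_cons, not_or] at h1 h2
    rw [List.cons_append, pvBGo_cons_ne c _ (Ne.symm h1.1), ih h1.2 h2.2]
    simp

-- ============ per-line lemma ============
theorem pvH (line : List Char) (h2 : '\n' ∉ line) (t : List Char) (ht : pvStop t) :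
    pvBGo (line ++ t) = pvFixLineA line ++ pvBGo t := by
  by_cases hmem : '#' ∈ line
  · obtain ⟨p, q, hpq, hp⟩ : ∃ p q, line = p ++ '#' :: q ∧ '#' ∉ p := by
      clear h2
      induction line with
      | nil => simp at hmem
      | cons c l ihl =>
        by_cases hc : c = '#'
        · exact ⟨[], l, by simp [hc], by simp⟩
        · have hml : '#' ∈ l := by
            rcases List.mem_cons.mp hmem with h | h
            · exact absurd h.symm hc
            · exact h
          obtain ⟨p, q, hq1, hq2⟩ := ihl hml
          exact ⟨c :: p, q, by simp [hq1], by
            simp only [List.mem_cons, not_or]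
            exact ⟨Ne.symm hc, hq2⟩⟩
    subst hpq
    simp only [List.mem_append, List.mem_cons, not_or] at h2
    obtain ⟨hpnl, _, hqnl⟩ := h2
    have hfind : PySem.Chars.find (p ++ '#' :: q) ['#'] = p.length := by
      rw [pv_find, pvF_append p q hp]
    rw [List.append_assoc, pvBGo_app p hp hpnl, List.cons_append]
    have hscan := pv_scan q hqnl t ht 0 none
    rcases hlq : pvLast q with _ | m <;> rw [hlq] at hscan <;> simp only [Nat.zero_add] at hscan
    · -- no further '#'
      have hq : '#' ∉ q := (pvLast_none_iff q).mp hlq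
      have hrfind : PySem.Chars.rfind (p ++ '#' :: q) ['#'] = p.length := by
        apply pv_rfind_val
        · rw [List.getElem?_append_right (le_refl p.length)]
          simp
        · intro i hi
          by_cases hge : (p ++ '#' :: q).length ≤ i
          · simp [List.getElem?_eq_none_iff.mpr hge]
          · push Not at hge
            rw [List.getElem?_append_right (by omega)]
            obtain ⟨d, hd⟩ : ∃ d, i - p.length = d + 1 := ⟨i - p.length - 1, by omega⟩
            rw [hd, List.getElem?_cons_succ]
            intro hcc
            exact hq (List.mem_of_getElem? hcc)
      have hfix : pvFixLineA (p ++ '#' :: q) = p ++ '#' :: q := by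
        unfold pvFixLineA
        rw [hfind, hrfind]
        have hcond : ((p.length : Int) ≠ -1 ∧ (p.length : Int) ≠ -1) := by
          constructor <;> omega
        rw [if_pos hcond]
        have h1 : PySem.List.slice (p ++ '#' :: q) none (some (p.length : Int)) = p := by
          rw [PySem.List.slice_to_natCast]
          exact List.take_left
        have h3 : PySem.List.slice (p ++ '#' :: q) (some ((p.length : Int) + 1)) none = q := by
          have : ((p.length : Int) + 1) = ((p.length + 1 : Nat) : Int) := by push_cast; ring
          rw [this, PySem.List.slice_from_natCast]
          have hassoc : p ++ '#' :: q = (p ++ ['#']) ++ q := by simp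
          rw [hassoc]
          have hlen : p.length + 1 = (p ++ ['#']).length := by simp
          rw [hlen, List.drop_left]
        rw [h1, h3]
        have h2 : ((p.length : Int) - p.length + 1).toNat = 1 := by omega
        rw [h2]
        simp
      rw [pvBGo_hash_none (q ++ t) hscan, pvBGo_app q hq hqnl, hfix]
      simp
    · -- last '#' of q at m
      obtain ⟨hm1, hm2, hm3⟩ := pvLast_some_spec q m hlq
      have hqd : '#' ∉ q.drop (m+1) := by
        rw [List.mem_iff_getElem?]
        rintro ⟨i, hi⟩
        rw [List.getElem?_drop] at hi
        exact hm3 (m + 1 + i) (by omega) hi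
      have hqdnl : '\n' ∉ q.drop (m+1) := fun hh => hqnl (List.mem_of_mem_drop hh)
      have hdrop : (q ++ t).drop (m+1) = q.drop (m+1) ++ t :=
        List.drop_append_of_le_length (by omega)
      have hrfind : PySem.Chars.rfind (p ++ '#' :: q) ['#'] = (p.length + 1 + m : Nat) := by
        apply pv_rfind_val
        · rw [List.getElem?_append_right (by omega)]
          have : p.length + 1 + m - p.length = m + 1 := by omega
          rw [this, List.getElem?_cons_succ]
          exact hm2
        · intro i hi
          by_cases hge : (p ++ '#' :: q).length ≤ i
          · simp [List.getElem?_eq_none_iff.mpr hge]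
          · push Not at hge
            rw [List.getElem?_append_right (by omega)]
            obtain ⟨d, hd⟩ : ∃ d, i - p.length = d + 1 ∧ m < d := by
              refine ⟨i - p.length - 1, by omega, by omega⟩
            rw [hd.1, List.getElem?_cons_succ]
            exact hm3 d hd.2
      have hfix : pvFixLineA (p ++ '#' :: q) =
          p ++ List.replicate (m + 2) '#' ++ q.drop (m+1) := by
        unfold pvFixLineA
        rw [hfind, hrfind]
        have hcond : ((p.length : Int) ≠ -1 ∧ ((p.length + 1 + m : Nat) : Int) ≠ -1) := by
          constructor <;> omega
        rw [if_pos hcond]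
        have h1 : PySem.List.slice (p ++ '#' :: q) none (some (p.length : Int)) = p := by
          rw [PySem.List.slice_to_natCast]
          exact List.take_left
        have h3 : PySem.List.slice (p ++ '#' :: q) (some (((p.length + 1 + m : Nat) : Int) + 1)) none
            = q.drop (m+1) := by
          have hcast : (((p.length + 1 + m : Nat) : Int) + 1) = ((p.length + 1 + (m + 1) : Nat) : Int) := by
            push_cast; ring
          rw [hcast, PySem.List.slice_from_natCast]
          have hassoc : p ++ '#' :: q = (p ++ ['#']) ++ q := by simp
          rw [hassoc]
          have hlen : p.length + 1 + (m+1) = (p ++ ['#']).length + (m+1) := by simp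
          rw [hlen, List.drop_append]
          simp
        rw [h1, h3]
        have h2 : (((p.length + 1 + m : Nat) : Int) - p.length + 1).toNat = m + 2 := by omega
        rw [h2]
      rw [pvBGo_hash_some (q ++ t) m hscan, hdrop, pvBGo_app (q.drop (m+1)) hqd hqdnl, hfix]
      simp
  · have hfix : pvFixLineA line = line := by
      unfold pvFixLineA
      rw [pv_find]
      have := (pvF_neg_iff line).mpr hmem
      simp [this]
    rw [hfix, pvBGo_app line hmem h2]

-- ============ main ============
theorem pvMain (cs : List Char) :
    PySem.Chars.join ['\n'] ((PySem.Chars.splitOn cs ['\n']).map pvFixLineA) = pvBGo cs := by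
  rw [pv_splitOn]
  induction hn : cs.length using Nat.strong_induction_on generalizing cs with
  | _ n ih =>
    rcases hd : cs.dropWhile (fun c => c ≠ '\n') with _ | ⟨c, r⟩
    · -- no newline
      have hcs : cs.takeWhile (fun c => c ≠ '\n') = cs := by
        have := List.takeWhile_append_dropWhile (p := fun c => c ≠ '\n') (l := cs)
        rw [hd] at this
        simpa using this
      have hnl : '\n' ∉ cs := by
        intro hmem
        rw [← hcs] at hmem
        have := List.mem_takeWhile_imp hmem
        simp at this
      rw [pvLines_no_nl cs hnl]
      simp only [List.map_cons, List.map_nil, PySem.Chars.join_singleton]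
      have hH := pvH cs hnl [] (Or.inl rfl)
      rw [List.append_nil] at hH
      rw [hH, pvBGo_nil, List.append_nil]
    · -- cs = line ++ '\n' :: r
      have hc : c = '\n' := by
        have := List.head?_dropWhile_not (fun c => c ≠ '\n') cs
        rw [hd] at this
        simpa using this
      subst hc
      set line := cs.takeWhile (fun c => c ≠ '\n') with hline
      have hsplit : cs = line ++ '\n' :: r := by
        rw [hline, ← hd, List.takeWhile_append_dropWhile]
      have hnl : '\n' ∉ line := by
        intro hmem
        have := List.mem_takeWhile_imp hmem
        simp at this
      have hlen : r.length < n := by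
        rw [← hn, hsplit]
        simp
        omega
      rw [hsplit, pvLines_append line r hnl]
      rcases hr : pvLines r with _ | ⟨a, b⟩
      · exact absurd hr (pvLines_ne_nil r)
      · simp only [List.map_cons, PySem.Chars.join_cons_cons]
        have hIH : PySem.Chars.join ['\n'] ((pvLines r).map pvFixLineA) = pvBGo r :=
          ih r.length hlen r rfl
        rw [hr] at hIH
        simp only [List.map_cons] at hIH
        rw [hIH]
        rw [pvH line hnl ('\n' :: r) (Or.inr ⟨r, rfl⟩)]
        rw [pvBGo_cons_ne '\n' r (by decide)]
        simp

-- ===== VERDICT (by name: the statement is the Claim_ definition above) =====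
theorem circle_mender_spec : Claim_equal_circle_mender := by
  intro content _
  unfold Spec_circle_mender circle_mender circle_mender_alt
  rw [pvMain]
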